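-- pv_equiv track=rewrite | github.com/Sebzdead/RIA-Segmentation | 7headangle.py | find_longest_geodesic_path
-- ===== SOURCE A (Python) =====
-- from collections import deque, defaultdict
--
-- def bfs_longest_path(graph, start_node, points):
--     """
--     Find the longest path from start_node using BFS.
--     Returns the path and its length.
--     """
--     if start_node not in graph:
--         return [], 0
--
--     visited = set()
--     queue = deque([(start_node, [start_node])])
--     longest_path = []
--     max_length = 0
--
--     while queue:
--         node, path = queue.popleft()
--
--         if node in visited:
--             continue
--
--         visited.add(node)
--
--         # Update longest path if current path is longer
--         if len(path) > max_length:
--             max_length = len(path)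
--             longest_path = path.copy()
--
--         # Explore neighbors
--         for neighbor in graph[node]:
--             if neighbor not in visited:
--                 new_path = path + [neighbor]
--                 queue.append((neighbor, new_path))
--
--     return longest_path, max_length
--
-- def find_longest_geodesic_path(graph, endpoints, points):
--     """
--     Find the longest geodesic path between any two endpoints.
--     """
--     if len(endpoints) < 2:
--         return []
--
--     best_path = []
--     max_length = 0
--
--     # Try all pairs of endpoints
--     for i, start in enumerate(endpoints):
--         for j, end in enumerate(endpoints):
--             if i >= j:
--                 continue
--
--             # BFS from start to find path to end
--             visited = set()
--             queue = deque([(start, [start])])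
--
--             while queue:
--                 node, path = queue.popleft()
--
--                 if node in visited:
--                     continue
--
--                 visited.add(node)
--
--                 if node == end:
--                     if len(path) > max_length:
--                         max_length = len(path)
--                         best_path = path.copy()
--                     break
--
--                 for neighbor in graph[node]:
--                     if neighbor not in visited:
--                         new_path = path + [neighbor]
--                         queue.append((neighbor, new_path))
--
--     # If no path found between endpoints, use longest path from any endpoint
--     if not best_path:
--         for endpoint in endpoints:
--             path, length = bfs_longest_path(graph, endpoint, points)
--             if length > max_length:
--                 max_length = length
--                 best_path = path
--
--     return best_path
-- ===== SOURCE B (Python) =====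
-- from collections import deque
--
-- def _bfs_paths(graph, source):
--     """One BFS from source: dict node -> path held when the node was first dequeued,
--     in dequeue order (so paths are BFS-shortest, with the same tie-breaking as a
--     fresh BFS that stops at that node)."""
--     paths = {}
--     visited = set()
--     queue = deque([(source, [source])])
--     while queue:
--         node, path = queue.popleft()
--         if node in visited:
--             continue
--         visited.add(node)
--         paths[node] = path
--         for nb in graph[node]:
--             if nb not in visited:
--                 queue.append((nb, path + [nb]))
--     return paths
--
-- def find_longest_geodesic_path(graph, endpoints, points):
--     if len(endpoints) < 2:
--         return []
--     best_path, max_length = [], 0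
--     tail = endpoints
--     while tail:
--         start, tail = tail[0], tail[1:]
--         if tail:
--             paths = _bfs_paths(graph, start)  # one BFS, reused for every later endpoint
--             for end in tail:
--                 p = paths.get(end)
--                 if p is not None and len(p) > max_length:
--                     best_path, max_length = p, len(p)
--     if not best_path:
--         for e in endpoints:
--             if e in graph:
--                 p = max(_bfs_paths(graph, e).values(), key=len)
--                 if len(p) > max_length:
--                     best_path, max_length = p, len(p)
--     return best_path
-- ===== Notes on version B (the rewrite author's own statement) =====
-- stated objective: faster
-- what changed: A reruns a fresh path-carrying BFS for every ordered pair of endpoints; B runs ONE BFS per source endpoint, records each node's first-dequeue path in a dict, and answers every later endpoint (and the longest-path fallback) by dict lookup/scan. Pre_ excludes inputs (with >= 2 endpoints) where some endpoint or listed neighbour is not a graph key: A generally raises KeyError expanding such a node and returns only by accident when every BFS stops before expanding one; B's own BFS raises KeyError on missing endpoints.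
-- outside the precondition, e.g. on find_longest_geodesic_path({}, [5, 5], []): A returns [5], B raises KeyError; on find_longest_geodesic_path({0: [1], 1: [0], 7: [8]}, [0, 1], []): A returns [0, 1], B returns [0, 1]
import Mathlib
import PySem

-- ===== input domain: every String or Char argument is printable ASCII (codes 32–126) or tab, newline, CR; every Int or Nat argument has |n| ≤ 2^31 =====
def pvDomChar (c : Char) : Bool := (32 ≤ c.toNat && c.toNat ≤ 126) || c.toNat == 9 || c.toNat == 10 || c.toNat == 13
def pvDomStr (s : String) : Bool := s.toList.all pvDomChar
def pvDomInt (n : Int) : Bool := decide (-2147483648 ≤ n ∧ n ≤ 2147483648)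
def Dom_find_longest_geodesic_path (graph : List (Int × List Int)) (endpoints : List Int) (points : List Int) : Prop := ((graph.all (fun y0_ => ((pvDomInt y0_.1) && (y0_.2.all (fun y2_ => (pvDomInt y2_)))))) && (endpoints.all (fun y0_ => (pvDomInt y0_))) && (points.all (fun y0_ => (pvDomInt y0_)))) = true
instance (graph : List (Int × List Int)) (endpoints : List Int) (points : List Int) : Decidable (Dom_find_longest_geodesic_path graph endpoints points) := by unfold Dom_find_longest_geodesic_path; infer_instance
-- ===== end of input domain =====

-- B replaces A's BFS-per-endpoint-pair with ONE BFS per source endpoint whose first-dequeue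
-- paths are recorded in a dict and reused for every later endpoint (same values, fewer BFS runs).


-- ===== PORT A =====
-- graph[node]: first-match association-list lookup; the [] default is never used under Pre_
-- (there every dequeued node is a key of graph)
def pvAdj (graph : List (Int × List Int)) (node : Int) : List Int :=
  (graph.lookup node).getD []

-- loop-bound fuel for the `while queue:` loops: #dequeues ≤ #enqueues ≤ 1 + total adjacency size
def pvFuel (graph : List (Int × List Int)) : Nat :=
  graph.foldl (fun a p => a + p.2.length) 0 + 2

-- A's inner `while queue:` of the pair phase: BFS carrying the path, break when `endv` is dequeued
def aPairLoop (graph : List (Int × List Int)) (endv : Int) :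
    Nat → PySem.Set Int → List (Int × List Int) → List Int × Nat → List Int × Nat
  | 0, _, _, bm => bm
  | _ + 1, _, [], bm => bm
  | f + 1, visited, (node, path) :: rest, bm =>
    if visited.contains node then aPairLoop graph endv f visited rest bm
    else
      let visited' := visited.add node
      if node = endv then
        if path.length > bm.2 then (path, path.length) else bm
      else
        aPairLoop graph endv f visited'
          ((pvAdj graph node).foldl
            (fun q nb => if visited'.contains nb then q else q ++ [(nb, path ++ [nb])]) rest) bm

-- the `while queue:` of A's helper bfs_longest_path: records the longest path dequeued so far
def aLongLoop (graph : List (Int × List Int)) :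
    Nat → PySem.Set Int → List (Int × List Int) → List Int × Nat → List Int × Nat
  | 0, _, _, bm => bm
  | _ + 1, _, [], bm => bm
  | f + 1, visited, (node, path) :: rest, bm =>
    if visited.contains node then aLongLoop graph f visited rest bm
    else
      let visited' := visited.add node
      aLongLoop graph f visited'
        ((pvAdj graph node).foldl
          (fun q nb => if visited'.contains nb then q else q ++ [(nb, path ++ [nb])]) rest)
        (if path.length > bm.2 then (path, path.length) else bm)

def bfs_longest_path (graph : List (Int × List Int)) (start_node : Int) (points : List Int) :
    List Int × Nat :=
  if (graph.lookup start_node).isSome = false then ([], 0)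
  else aLongLoop graph (pvFuel graph) PySem.Set.empty [(start_node, [start_node])] ([], 0)

def find_longest_geodesic_path (graph : List (Int × List Int)) (endpoints : List Int) (points : List Int) : List Int :=
  if endpoints.length < 2 then []
  else
    let bm :=
      (PySem.List.enumerate endpoints 0).foldl
        (fun bm is =>
          (PySem.List.enumerate endpoints 0).foldl
            (fun bm je =>
              if je.1 ≤ is.1 then bm
              else aPairLoop graph je.2 (pvFuel graph) PySem.Set.empty [(is.2, [is.2])] bm)
            bm)
        ([], 0)
    if bm.1.isEmpty then
      (endpoints.foldl (fun bm endpoint =>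
        let pl := bfs_longest_path graph endpoint points
        if pl.2 > bm.2 then pl else bm) bm).1
    else bm.1

-- ===== PORT B =====
-- _bfs_paths: ONE BFS from `source`; returns the dict {node: path at first dequeue} in dequeue order
def bfsPaths (graph : List (Int × List Int)) :
    Nat → PySem.Set Int → List (Int × List Int) → List (Int × List Int)
  | 0, _, _ => []
  | _ + 1, _, [] => []
  | f + 1, visited, (node, path) :: rest =>
    if visited.contains node then bfsPaths graph f visited rest
    else
      let visited' := visited.add node
      (node, path) ::
        bfsPaths graph f visited'
          ((pvAdj graph node).foldl
            (fun q nb => if visited'.contains nb then q else q ++ [(nb, path ++ [nb])]) rest)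

def bSourcePaths (graph : List (Int × List Int)) (source : Int) : List (Int × List Int) :=
  bfsPaths graph (pvFuel graph) PySem.Set.empty [(source, [source])]

-- `p = paths.get(end); if p is not None and len(p) > max_length: best, max = p, len(p)`
def gStep (paths : List (Int × List Int)) (bm : List Int × Nat) (endv : Int) : List Int × Nat :=
  match paths.lookup endv with
  | some p => if p.length > bm.2 then (p, p.length) else bm
  | none => bm

-- max(ps, key=len): first element of maximal length ([] only on the empty list, unreachable in B)
def bMaxByLen (ps : List (List Int)) : List Int :=
  match ps with
  | [] => []
  | h :: t => t.foldl (fun a p => if p.length > a.length then p else a) h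

-- the `while tail:` loop of B: one BFS per start endpoint, reused for every later endpoint
def bPairPhase (graph : List (Int × List Int)) : List Int → List Int × Nat → List Int × Nat
  | [], bm => bm
  | start :: tail, bm =>
    if tail.isEmpty then bPairPhase graph tail bm
    else bPairPhase graph tail (tail.foldl (gStep (bSourcePaths graph start)) bm)

def find_longest_geodesic_path_alt (graph : List (Int × List Int)) (endpoints : List Int) (points : List Int) : List Int :=
  if endpoints.length < 2 then []
  else
    let bm := bPairPhase graph endpoints ([], 0)
    if bm.1.isEmpty then
      (endpoints.foldl (fun bm e =>
        if (graph.lookup e).isSome then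
          let p := bMaxByLen ((bSourcePaths graph e).map (·.2))
          if p.length > bm.2 then (p, p.length) else bm
        else bm) bm).1
    else bm.1

-- ===== PRECONDITION & SPEC =====
-- Pre_ excludes inputs (with ≥ 2 endpoints) where some endpoint or some listed neighbour is not a
-- key of graph: there A raises KeyError as soon as such a node is expanded, and returns only by
-- accident when every BFS stops before expanding one (e.g. duplicate endpoints, or a dangling
-- entry unreachable from the endpoints); B's own BFS raises KeyError on the former.
def Pre_find_longest_geodesic_path (graph : List (Int × List Int)) (endpoints : List Int) (points : List Int) : Prop :=
  endpoints.length < 2 ∨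
    ((∀ e ∈ endpoints, (graph.lookup e).isSome = true) ∧
     (∀ p ∈ graph, ∀ v ∈ p.2, (graph.lookup v).isSome = true))
instance (graph : List (Int × List Int)) (endpoints : List Int) (points : List Int) : Decidable (Pre_find_longest_geodesic_path graph endpoints points) := by unfold Pre_find_longest_geodesic_path; infer_instance

def pvWitness_find_longest_geodesic_path : (List (Int × List Int)) × List Int × List Int :=
  ([(0, [1]), (1, [0, 2]), (2, [1])], [0, 2], [])

def Spec_find_longest_geodesic_path (graph : List (Int × List Int)) (endpoints : List Int) (points : List Int) (out : List Int) : Prop := out = find_longest_geodesic_path_alt graph endpoints points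
instance (graph : List (Int × List Int)) (endpoints : List Int) (points : List Int) (out : List Int) : Decidable (Spec_find_longest_geodesic_path graph endpoints points out) := by unfold Spec_find_longest_geodesic_path; infer_instance

-- ===== CLAIM (what is proved, stated in full; the proofs are below) =====
def Claim_equal_find_longest_geodesic_path : Prop := ∀ (graph : List (Int × List Int)) (endpoints : List Int) (points : List Int), Dom_find_longest_geodesic_path graph endpoints points → Pre_find_longest_geodesic_path graph endpoints points → Spec_find_longest_geodesic_path graph endpoints points (find_longest_geodesic_path graph endpoints points)

-- ===== LEMMAS AND PROOFS =====

lemma not_mem_add (s : PySem.Set Int) (x y : Int) (hs : y ∉ s) (hxy : x ≠ y) :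
    y ∉ s.add x := by
  simp only [PySem.Set.mem_add]
  rintro (h | rfl)
  · exact hs h
  · exact hxy rfl

-- A's per-pair BFS (break at `endv`) returns exactly the `endv` entry of B's path dict
lemma pairLoop_eq (graph : List (Int × List Int)) (endv : Int) :
    ∀ (f : Nat) (V : PySem.Set Int) (Q : List (Int × List Int)) (bm : List Int × Nat),
      endv ∉ V →
      aPairLoop graph endv f V Q bm = gStep (bfsPaths graph f V Q) bm endv := by
  intro f
  induction f with
  | zero => intro V Q bm _; simp [aPairLoop, bfsPaths, gStep]
  | succ f ih =>
    intro V Q bm hV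
    cases Q with
    | nil => simp [aPairLoop, bfsPaths, gStep]
    | cons q rest =>
      obtain ⟨node, path⟩ := q
      by_cases hvis : node ∈ V
      · simp only [aPairLoop, bfsPaths, PySem.Set.contains_eq_listContains,
          List.contains_iff_mem, hvis, if_true, decide_true]
        exact ih _ _ _ hV
      · by_cases hend : node = endv
        · subst hend
          simp [aPairLoop, bfsPaths, hvis, gStep, List.lookup]
        · have hV' : endv ∉ V.add node := not_mem_add _ _ _ hV hend
          simp only [aPairLoop, bfsPaths, PySem.Set.contains_eq_listContains,
            List.contains_iff_mem, hvis, decide_false, Bool.false_eq_true, if_false,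
            if_neg hend]
          rw [ih _ _ _ hV']
          have hbe : (endv == node) = false := by simp [Ne.symm hend]
          simp [gStep, List.lookup, hbe]

lemma pairLoop_empty (graph : List (Int × List Int)) (endv start : Int) (bm : List Int × Nat) :
    aPairLoop graph endv (pvFuel graph) PySem.Set.empty [(start, [start])] bm
      = gStep (bSourcePaths graph start) bm endv := by
  apply pairLoop_eq
  simp [PySem.Set.empty]

-- A's longest-path BFS loop is a fold of its update step over B's path dict
lemma longLoop_eq (graph : List (Int × List Int)) :
    ∀ (f : Nat) (V : PySem.Set Int) (Q : List (Int × List Int)) (bm : List Int × Nat),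
      aLongLoop graph f V Q bm =
        ((bfsPaths graph f V Q).map (·.2)).foldl
          (fun bm p => if p.length > bm.2 then (p, p.length) else bm) bm := by
  intro f
  induction f with
  | zero => intro V Q bm; simp [aLongLoop, bfsPaths]
  | succ f ih =>
    intro V Q bm
    cases Q with
    | nil => simp [aLongLoop, bfsPaths]
    | cons q rest =>
      obtain ⟨node, path⟩ := q
      by_cases hvis : node ∈ V
      · simp only [aLongLoop, bfsPaths, PySem.Set.contains_eq_listContains,
          List.contains_iff_mem, hvis, if_true, decide_true]
        exact ih _ _ _
      · simp only [aLongLoop, bfsPaths, PySem.Set.contains_eq_listContains,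
          List.contains_iff_mem, hvis, decide_false, Bool.false_eq_true, if_false,
          List.map_cons, List.foldl_cons]
        exact ih _ _ _

-- the strict-improvement scan started at (p0, |p0|) computes Python's max(·, key=len)
lemma scan_eq_max :
    ∀ (ps : List (List Int)) (p0 : List Int),
      ps.foldl (fun bm p => if p.length > bm.2 then (p, p.length) else bm) (p0, p0.length)
        = (ps.foldl (fun a p => if p.length > a.length then p else a) p0,
           (ps.foldl (fun a p => if p.length > a.length then p else a) p0).length) := by
  intro ps
  induction ps with
  | nil => intro p0; rfl
  | cons h t ih =>
    intro p0
    by_cases hlen : h.length > p0.length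
    · simpa [hlen] using ih h
    · simpa [hlen] using ih p0

lemma step_nil (p : List Int) :
    (if p.length > 0 then (p, p.length) else (([], 0) : List Int × Nat)) = (p, p.length) := by
  cases p <;> simp

lemma bSourcePaths_cons (graph : List (Int × List Int)) (e : Int) :
    ∃ t, bSourcePaths graph e = (e, [e]) :: t := by
  have hf : pvFuel graph = (graph.foldl (fun a p => a + p.2.length) 0 + 1) + 1 := rfl
  unfold bSourcePaths
  rw [hf, bfsPaths]
  simp [PySem.Set.empty]

-- the two fallback update steps agree
lemma fallback_step_eq (graph : List (Int × List Int)) (points : List Int)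
    (bm : List Int × Nat) (e : Int) :
    (let pl := bfs_longest_path graph e points
     if pl.2 > bm.2 then pl else bm)
      =
    (if (graph.lookup e).isSome then
        let p := bMaxByLen ((bSourcePaths graph e).map (·.2))
        if p.length > bm.2 then (p, p.length) else bm
      else bm) := by
  by_cases hk : (graph.lookup e).isSome
  · obtain ⟨t, ht⟩ := bSourcePaths_cons graph e
    have h1 : bfs_longest_path graph e points =
        ((bSourcePaths graph e).map (·.2)).foldl
          (fun bm p => if p.length > bm.2 then (p, p.length) else bm) ([], 0) := by
      unfold bfs_longest_path bSourcePaths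
      rw [if_neg (by simp [hk])]
      exact longLoop_eq graph _ _ _ _
    rw [h1, ht]
    simp only [List.map_cons, List.foldl_cons, bMaxByLen]
    rw [show (if ([e] : List Int).length > (([], 0) : List Int × Nat).2
          then (([e] : List Int), ([e] : List Int).length) else ([], 0)) = ([e], [e].length)
        from step_nil [e]]
    rw [scan_eq_max]
    simp [hk]
  · have h0 : bfs_longest_path graph e points = ([], 0) := by
      unfold bfs_longest_path
      rw [if_pos (by revert hk; cases (graph.lookup e).isSome <;> simp)]
    simp [h0, hk]

-- inner fold over enumerate with a guard below every index: the guard disappears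
lemma inner_noguard (g : (List Int × Nat) → Int → List Int × Nat) :
    ∀ (t : List Int) (s i : Int) (bm : List Int × Nat), i < s →
      (PySem.List.enumerate t s).foldl
          (fun bm je => if je.1 ≤ i then bm else g bm je.2) bm
        = t.foldl g bm := by
  intro t
  induction t with
  | nil => intro s i bm _; simp [PySem.List.enumerate_nil]
  | cons x tl ih =>
    intro s i bm his
    rw [PySem.List.enumerate_cons]
    have : ¬ s ≤ i := by omega
    simp only [List.foldl_cons, if_neg this]
    exact ih (s + 1) i _ (by omega)

-- A's guarded double fold over enumerate IS B's one-BFS-per-start phase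
lemma outer_eq (graph : List (Int × List Int)) :
    ∀ (l : List Int) (s : Int) (bm : List Int × Nat),
      (PySem.List.enumerate l s).foldl
        (fun bm is =>
          (PySem.List.enumerate l s).foldl
            (fun bm je => if je.1 ≤ is.1 then bm
              else gStep (bSourcePaths graph is.2) bm je.2) bm) bm
        = bPairPhase graph l bm := by
  intro l
  induction l with
  | nil => intro s bm; simp [PySem.List.enumerate_nil, bPairPhase]
  | cons x t ih =>
    intro s bm
    have e1 : PySem.List.enumerate (x :: t) s = (s, x) :: PySem.List.enumerate t (s + 1) := by
      rw [PySem.List.enumerate_cons]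
    have peel : ∀ (i st : Int) (acc : List Int × Nat), s ≤ i →
        ((s, x) :: PySem.List.enumerate t (s + 1)).foldl
          (fun bm je => if je.1 ≤ i then bm else gStep (bSourcePaths graph st) bm je.2) acc
        = (PySem.List.enumerate t (s + 1)).foldl
          (fun bm je => if je.1 ≤ i then bm else gStep (bSourcePaths graph st) bm je.2) acc := by
      intro i st acc hsi
      simp only [List.foldl_cons, if_pos hsi]
    have hrest : ∀ (acc : List Int × Nat) (is : Int × Int), is ∈ PySem.List.enumerate t (s + 1) →
        ((s, x) :: PySem.List.enumerate t (s + 1)).foldl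
          (fun bm je => if je.1 ≤ is.1 then bm else gStep (bSourcePaths graph is.2) bm je.2) acc
        = (PySem.List.enumerate t (s + 1)).foldl
          (fun bm je => if je.1 ≤ is.1 then bm else gStep (bSourcePaths graph is.2) bm je.2) acc := by
      intro acc is hmem
      refine peel is.1 is.2 acc ?_
      rw [PySem.List.mem_enumerate_iff] at hmem
      obtain ⟨k, hk, rfl⟩ := hmem
      simp
      omega
    rw [e1, List.foldl_cons]
    rw [peel (s, x).1 (s, x).2 bm (le_refl s)]
    rw [inner_noguard (gStep (bSourcePaths graph (s, x).2)) t (s + 1) (s, x).1 bm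
      (by change s < s + 1; omega)]
    rw [PySem.List.foldl_congr_mem _ _ _ _ hrest]
    rw [ih (s + 1)]
    cases t with
    | nil => simp [bPairPhase]
    | cons y tt => simp [bPairPhase]

-- ===== VERDICT (by name: the statement is the Claim_ definition above) =====
theorem find_longest_geodesic_path_spec : Claim_equal_find_longest_geodesic_path := by
  intro graph endpoints points _dom _pre
  unfold Spec_find_longest_geodesic_path
  unfold find_longest_geodesic_path find_longest_geodesic_path_alt
  by_cases h2 : endpoints.length < 2
  · rw [if_pos h2, if_pos h2]
  · rw [if_neg h2, if_neg h2]
    simp only [pairLoop_empty]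
    rw [outer_eq graph endpoints 0]
    have hfb :
        (fun (bm : List Int × Nat) endpoint =>
          let pl := bfs_longest_path graph endpoint points
          if pl.2 > bm.2 then pl else bm)
          = (fun (bm : List Int × Nat) e =>
              if (graph.lookup e).isSome then
                let p := bMaxByLen ((bSourcePaths graph e).map (·.2))
                if p.length > bm.2 then (p, p.length) else bm
              else bm) := by
      funext bm e
      exact fallback_step_eq graph points bm e
    rw [hfb]
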